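-- pv_equiv track=rewrite | github.com/pettarin/export-kobo | old/export_Kobo_notes_3.py | print_titles
-- ===== SOURCE A (Python) =====
-- def print_titles(data):
--     acc = ""
--     tit = []
--     fil = dict()
--
--     for d in data:
--         [f_type, booktitle, text, annotation, date_created, date_modified] = d
--         if (not booktitle in fil):
--             tit.append(booktitle)
--             fil[booktitle] = True
--
--     tit = sorted(tit)
--     for t in tit:
--         acc += "'%s'\n" % (t)
--
--     return acc.strip()
-- ===== SOURCE B (Python) =====
-- def print_titles(data):
--     titles = []
--     for d in data:
--         [f_type, booktitle, text, annotation, date_created, date_modified] = d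
--         titles.append(booktitle)
--     titles.sort()
--     uniq = []
--     prev = None
--     for t in titles:
--         if prev != t:
--             uniq.append(t)
--             prev = t
--     return "\n".join("'%s'" % t for t in uniq)
-- ===== Notes on version B (the rewrite author's own statement) =====
-- stated objective: alternative
-- what changed: B collects every booktitle (duplicates included), sorts the full list, deduplicates by comparing each element with the previously emitted one, and joins the quoted titles with newlines, replacing A's dict-membership dedup-then-sort and string-concatenation-then-strip.
import Mathlib
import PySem

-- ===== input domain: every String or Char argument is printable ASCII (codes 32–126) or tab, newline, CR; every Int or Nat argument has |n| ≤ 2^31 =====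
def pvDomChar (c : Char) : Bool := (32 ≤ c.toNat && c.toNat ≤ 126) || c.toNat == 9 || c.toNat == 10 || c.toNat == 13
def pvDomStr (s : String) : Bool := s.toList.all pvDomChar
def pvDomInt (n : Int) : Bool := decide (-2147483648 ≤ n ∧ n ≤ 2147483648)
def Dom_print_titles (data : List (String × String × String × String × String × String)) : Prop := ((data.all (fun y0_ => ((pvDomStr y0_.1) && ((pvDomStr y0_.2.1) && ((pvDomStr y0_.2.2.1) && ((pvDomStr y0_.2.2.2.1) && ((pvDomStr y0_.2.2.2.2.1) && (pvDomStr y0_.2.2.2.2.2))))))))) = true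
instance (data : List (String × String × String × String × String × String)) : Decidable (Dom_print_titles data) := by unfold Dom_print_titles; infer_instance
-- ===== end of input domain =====

-- B replaces A's dict-membership dedup-then-sort with sort-all-then-adjacent-dedup and a newline join (alternative decomposition, same asymptotic cost).

-- ===== PORT A =====
def print_titles (data : List (String × String × String × String × String × String)) : String :=
  let acc : String := ""
  let tit : List String := []
  let fil : PySem.Dict String Bool := PySem.Dict.mk []
  -- for d in data: unpack the six fields; append booktitle if not already in fil
  let st := data.foldl
    (fun (st : List String × PySem.Dict String Bool) d =>
      match d with
      | (_f_type, booktitle, _text, _annotation, _date_created, _date_modified) =>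
        if st.2.contains booktitle = false then
          (st.1 ++ [booktitle], st.2.insert booktitle true)
        else st)
    (tit, fil)
  let tit2 := PySem.List.sorted st.1 (fun x => x) false
  -- for t in tit: acc += "'%s'\n" % t
  let acc2 := tit2.foldl (fun acc t => acc ++ ("'" ++ t ++ "'\n")) acc
  PySem.Str.strip acc2

-- ===== PORT B =====
def print_titles_alt (data : List (String × String × String × String × String × String)) : String :=
  -- collect every booktitle (duplicates included)
  let titles := data.foldl
    (fun (ts : List String) d =>
      match d with
      | (_f_type, booktitle, _text, _annotation, _date_created, _date_modified) =>
        ts ++ [booktitle])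
    []
  let titles2 := PySem.List.sorted titles (fun x => x) false
  -- adjacent dedup over the sorted list with a 'prev' sentinel
  let st := titles2.foldl
    (fun (st : Option String × List String) t =>
      if st.1 ≠ some t then (some t, st.2 ++ [t]) else st)
    (none, [])
  PySem.Str.join "\n" (st.2.map (fun t => "'" ++ t ++ "'"))

-- ===== PRECONDITION & SPEC =====
def Spec_print_titles (data : List (String × String × String × String × String × String)) (out : String) : Prop := out = print_titles_alt data
instance (data : List (String × String × String × String × String × String)) (out : String) : Decidable (Spec_print_titles data out) := by unfold Spec_print_titles; infer_instance

-- ===== CLAIM (what is proved, stated in full; the proofs are below) =====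
def Claim_equal_print_titles : Prop := ∀ (data : List (String × String × String × String × String × String)), Dom_print_titles data → Spec_print_titles data (print_titles data)

-- ===== LEMMAS AND PROOFS =====

-- projection form of A's loop body (definitionally equal to the port's match-lambda)
def pvStepA (st : List String × PySem.Dict String Bool)
    (d : String × String × String × String × String × String) :
    List String × PySem.Dict String Bool :=
  if st.2.contains d.2.1 = false then (st.1 ++ [d.2.1], st.2.insert d.2.1 true) else st

theorem pvStepA_eq :
    (fun (st : List String × PySem.Dict String Bool)
         (d : String × String × String × String × String × String) =>
      match d with
      | (_f_type, booktitle, _text, _annotation, _date_created, _date_modified) =>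
        if st.2.contains booktitle = false then
          (st.1 ++ [booktitle], st.2.insert booktitle true)
        else st) = pvStepA := by
  funext st d
  obtain ⟨_, _, _, _, _, _⟩ := d
  rfl

def pvStepC (ts : List String) (d : String × String × String × String × String × String) :
    List String :=
  ts ++ [d.2.1]

theorem pvStepC_eq :
    (fun (ts : List String) (d : String × String × String × String × String × String) =>
      match d with
      | (_f_type, booktitle, _text, _annotation, _date_created, _date_modified) =>
        ts ++ [booktitle]) = pvStepC := by
  funext ts d
  obtain ⟨_, _, _, _, _, _⟩ := d
  rfl

def pvStepB (st : Option String × List String) (t : String) : Option String × List String :=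
  if st.1 ≠ some t then (some t, st.2 ++ [t]) else st

-- A's first loop: the accumulated title list is duplicate-free and holds exactly the booktitles seen.
theorem loopA_spec (l : List (String × String × String × String × String × String))
    (tit : List String) (fil : PySem.Dict String Bool)
    (hinv : ∀ x, fil.contains x = true ↔ x ∈ tit) (hnd : tit.Nodup) :
    (l.foldl pvStepA (tit, fil)).1.Nodup ∧
    (∀ x, x ∈ (l.foldl pvStepA (tit, fil)).1 ↔ x ∈ tit ∨ x ∈ l.map (fun d => d.2.1)) := by
  induction l generalizing tit fil with
  | nil => exact ⟨hnd, fun x => by simp⟩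
  | cons d l ih =>
    by_cases hc : fil.contains d.2.1 = true
    · have hstep : pvStepA (tit, fil) d = (tit, fil) := by simp [pvStepA, hc]
      rw [List.foldl_cons, hstep]
      obtain ⟨h1, h2⟩ := ih tit fil hinv hnd
      refine ⟨h1, fun x => ?_⟩
      rw [h2 x]
      simp only [List.map_cons, List.mem_cons]
      constructor
      · rintro (h | h) <;> tauto
      · rintro (h | h | h)
        · tauto
        · exact Or.inl ((hinv x).mp (h ▸ hc))
        · tauto
    · rw [Bool.not_eq_true] at hc
      have hstep : pvStepA (tit, fil) d = (tit ++ [d.2.1], fil.insert d.2.1 true) := by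
        simp [pvStepA, hc]
      rw [List.foldl_cons, hstep]
      have hb : d.2.1 ∉ tit := fun hb => by
        rw [← hinv d.2.1, hc] at hb; exact Bool.false_ne_true hb
      have hinv' : ∀ x, (fil.insert d.2.1 true).contains x = true ↔ x ∈ tit ++ [d.2.1] := by
        intro x
        rw [PySem.Dict.contains_insert]
        simp only [Bool.or_eq_true, beq_iff_eq, List.mem_append, List.mem_singleton, hinv x]
        tauto
      have hnd' : (tit ++ [d.2.1]).Nodup := by
        rw [List.nodup_append]
        refine ⟨hnd, List.nodup_singleton _, ?_⟩
        intro a ha b hbmem hab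
        subst hab
        have hb1 : a = d.2.1 := by simpa using hbmem
        exact hb (hb1 ▸ ha)
      obtain ⟨h1, h2⟩ := ih (tit ++ [d.2.1]) (fil.insert d.2.1 true) hinv' hnd'
      refine ⟨h1, fun x => ?_⟩
      rw [h2 x]
      simp only [List.mem_append, List.map_cons, List.mem_cons]
      tauto

-- B's booktitle-collecting loop is an append of the mapped list.
theorem loopC_spec (l : List (String × String × String × String × String × String))
    (ts : List String) :
    l.foldl pvStepC ts = ts ++ l.map (fun d => d.2.1) := by
  induction l generalizing ts with
  | nil => simp
  | cons d l ih => simp [List.foldl_cons, pvStepC, ih]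

-- B's adjacent-dedup loop on a ≤-sorted remainder: strictly increasing output, same membership.
theorem loopB_spec (l : List String) (p : String) (uniq : List String)
    (hl : l.Pairwise (· ≤ ·)) (hp : ∀ y ∈ l, p ≤ y)
    (huq : uniq.Pairwise (· < ·)) (hle : ∀ x ∈ uniq, x ≤ p) (hpm : p ∈ uniq) :
    (l.foldl pvStepB (some p, uniq)).2.Pairwise (· < ·) ∧
    (∀ x, x ∈ (l.foldl pvStepB (some p, uniq)).2 ↔ x ∈ uniq ∨ x ∈ l) := by
  induction l generalizing p uniq with
  | nil => exact ⟨huq, fun x => by simp⟩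
  | cons t l ih =>
    have hpt : p ≤ t := hp t (List.mem_cons_self ..)
    have hl' : l.Pairwise (· ≤ ·) := hl.tail
    have hpt' : ∀ y ∈ l, t ≤ y := fun y hy => List.rel_of_pairwise_cons hl hy
    by_cases heq : p = t
    · have hstep : pvStepB (some p, uniq) t = (some p, uniq) := by simp [pvStepB, heq]
      rw [List.foldl_cons, hstep]
      obtain ⟨h1, h2⟩ := ih p uniq hl' (heq ▸ hpt') huq hle hpm
      refine ⟨h1, fun x => ?_⟩
      rw [h2 x]
      simp only [List.mem_cons]
      constructor
      · rintro (h | h) <;> tauto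
      · rintro (h | h | h)
        · tauto
        · refine Or.inl ?_
          rw [h, ← heq]
          exact hpm
        · tauto
    · have hlt : p < t := lt_of_le_of_ne hpt heq
      have hstep : pvStepB (some p, uniq) t = (some t, uniq ++ [t]) := by
        simp [pvStepB, heq]
      rw [List.foldl_cons, hstep]
      have huq' : (uniq ++ [t]).Pairwise (· < ·) := by
        rw [List.pairwise_append]
        refine ⟨huq, List.pairwise_singleton _ _, fun x hx y hy => ?_⟩
        simp only [List.mem_singleton] at hy
        exact hy ▸ lt_of_le_of_lt (hle x hx) hlt
      have hle' : ∀ x ∈ uniq ++ [t], x ≤ t := by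
        intro x hx
        rcases List.mem_append.mp hx with h | h
        · exact le_trans (hle x h) (le_of_lt hlt)
        · simp only [List.mem_singleton] at h; exact le_of_eq h
      obtain ⟨h1, h2⟩ := ih t (uniq ++ [t]) hl' hpt' huq' hle' (by simp)
      refine ⟨h1, fun x => ?_⟩
      rw [h2 x]
      simp only [List.mem_append, List.mem_cons]
      tauto

-- A's formatting loop, pushed down to character lists.
theorem foldlAcc_toList (ys : List String) (acc : String) :
    (ys.foldl (fun acc t => acc ++ ("'" ++ t ++ "'\n")) acc).toList
      = acc.toList ++ (ys.map (fun t => '\'' :: (t.toList ++ ['\'', '\n']))).flatten := by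
  induction ys generalizing acc with
  | nil => simp
  | cons y ys ih =>
    simp only [List.foldl_cons, ih, List.map_cons, List.flatten_cons, String.toList_append]
    have h1 : ("'" : String).toList = ['\''] := by decide
    have h2 : ("'\n" : String).toList = ['\'', '\n'] := by decide
    simp [h1, h2]

-- Shape of the two renderings of a nonempty title list.
theorem render_shape (y : String) (rest : List String) :
    ∃ A : List Char,
      PySem.Chars.join ['\n'] ((y :: rest).map (fun t => '\'' :: (t.toList ++ ['\''])))
        = '\'' :: (A ++ ['\'']) ∧
      ((y :: rest).map (fun t => '\'' :: (t.toList ++ ['\'', '\n']))).flatten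
        = '\'' :: (A ++ ['\'', '\n']) := by
  induction rest generalizing y with
  | nil =>
    refine ⟨y.toList, ?_, ?_⟩
    · simp [PySem.Chars.join_singleton]
    · simp
  | cons z r ih =>
    obtain ⟨A, h1, h2⟩ := ih z
    refine ⟨y.toList ++ ['\'', '\n', '\''] ++ A, ?_, ?_⟩
    · simp only [List.map_cons] at h1 ⊢
      rw [PySem.Chars.join_cons_cons, h1]
      simp
    · simp only [List.map_cons, List.flatten_cons] at h2 ⊢
      rw [h2]
      simp

-- strip removes exactly the trailing newline of the rendered block.
theorem strip_render (A : List Char) :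
    PySem.Chars.strip ('\'' :: (A ++ ['\'', '\n'])) = '\'' :: (A ++ ['\'']) := by
  unfold PySem.Chars.strip PySem.Chars.lstrip PySem.Chars.rstrip
  rw [List.dropWhile_cons]
  have h1 : PySem.Chars.isspace '\'' = false := by decide
  have h2 : PySem.Chars.isspace '\n' = true := by decide
  simp only [h1, Bool.false_eq_true, if_false]
  have hrev : ('\'' :: (A ++ ['\'', '\n'])).reverse = '\n' :: '\'' :: (A.reverse ++ ['\'']) := by
    simp
  rw [hrev, List.dropWhile_cons, h2, if_pos rfl, List.dropWhile_cons, h1]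
  simp

-- The full string step: strip of A's accumulated block = B's newline join, for ANY title list.
theorem string_step (ys : List String) :
    PySem.Str.strip (ys.foldl (fun acc t => acc ++ ("'" ++ t ++ "'\n")) "")
      = PySem.Str.join "\n" (ys.map (fun t => "'" ++ t ++ "'")) := by
  rw [← String.toList_inj, PySem.Str.toList_strip, PySem.Str.toList_join, foldlAcc_toList]
  have hq : ∀ t : String, ("'" ++ t ++ "'" : String).toList = '\'' :: (t.toList ++ ['\'']) := by
    intro t
    have h1 : ("'" : String).toList = ['\''] := by decide
    simp [String.toList_append, h1]
  have hsep : ("\n" : String).toList = ['\n'] := by decide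
  rw [hsep]
  have hmap : (ys.map (fun t => "'" ++ t ++ "'")).map String.toList
      = ys.map (fun t => '\'' :: (t.toList ++ ['\''])) := by
    rw [List.map_map]; exact List.map_congr_left (fun t _ => hq t)
  rw [hmap]
  cases ys with
  | nil => simp [PySem.Chars.join_nil, PySem.Chars.strip, PySem.Chars.lstrip, PySem.Chars.rstrip]
  | cons y rest =>
    obtain ⟨A, h1, h2⟩ := render_shape y rest
    rw [h2, h1]
    simpa using strip_render A

-- ===== VERDICT (by name: the statement is the Claim_ definition above) =====
theorem print_titles_spec : Claim_equal_print_titles := by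
  intro data _hdom
  unfold Spec_print_titles print_titles print_titles_alt
  rw [pvStepA_eq, pvStepC_eq]
  show PySem.Str.strip
      ((PySem.List.sorted (data.foldl pvStepA ([], PySem.Dict.mk [])).1 (fun x => x) false).foldl
        (fun acc t => acc ++ ("'" ++ t ++ "'\n")) "")
    = PySem.Str.join "\n"
      (((PySem.List.sorted (data.foldl pvStepC []) (fun x => x) false).foldl pvStepB
          (none, [])).2.map (fun t => "'" ++ t ++ "'"))
  obtain ⟨hndA, hmemA⟩ := loopA_spec data [] (PySem.Dict.mk [])
    (fun x => by simp [PySem.Dict.contains]) List.nodup_nil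
  rw [loopC_spec data []]
  simp only [List.nil_append]
  set titles := data.map (fun d => d.2.1) with htitles
  have hsp : (PySem.List.sorted titles (fun x => x) false).Pairwise (· ≤ ·) := by
    simpa using PySem.List.sorted_pairwise titles (fun x => x)
  rcases hsrt : PySem.List.sorted titles (fun x => x) false with _ | ⟨t, rest⟩
  · -- sorted titles empty → titles empty → A's deduped list empty too
    have htn : titles = [] := by
      by_contra h
      rcases List.exists_mem_of_ne_nil _ h with ⟨x, hx⟩
      have hmem := (PySem.List.mem_sorted titles (fun x => x) false x).mpr hx
      rw [hsrt] at hmem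
      exact absurd hmem (List.not_mem_nil)
    have hAnil : (data.foldl pvStepA ([], PySem.Dict.mk [])).1 = [] := by
      rcases h : (data.foldl pvStepA ([], PySem.Dict.mk [])).1 with _ | ⟨x, xs⟩
      · rfl
      · exfalso
        have hx : x ∈ (data.foldl pvStepA ([], PySem.Dict.mk [])).1 := by
          rw [h]; exact List.mem_cons_self ..
        have hx2 := (hmemA x).mp hx
        rw [htn] at hx2
        simp at hx2
    rw [hAnil]
    have hnil : PySem.List.sorted ([] : List String) (fun x => x) false = [] := by
      apply PySem.List.sorted_eq_of_perm_of_pairwise_lt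
      · exact List.Perm.refl []
      · exact List.Pairwise.nil
    rw [hnil]
    simpa using string_step []
  · rw [List.foldl_cons]
    have hstep0 : pvStepB (none, []) t = (some t, [t]) := by simp [pvStepB]
    rw [hstep0]
    have hrest : rest.Pairwise (· ≤ ·) := (hsrt ▸ hsp).tail
    have hpt : ∀ y ∈ rest, t ≤ y := fun y hy => List.rel_of_pairwise_cons (hsrt ▸ hsp) hy
    obtain ⟨hndB, hmemB⟩ := loopB_spec rest t [t] hrest hpt
      (List.pairwise_singleton _ _) (by simp) (by simp)
    have hkey : PySem.List.sorted (data.foldl pvStepA ([], PySem.Dict.mk [])).1 (fun x => x) false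
        = (rest.foldl pvStepB (some t, [t])).2 := by
      apply PySem.List.sorted_eq_of_perm_of_pairwise_lt
      · rw [List.perm_ext_iff_of_nodup (hndB.imp (fun h => LT.lt.ne h)) hndA]
        intro x
        rw [hmemB x, hmemA x]
        have hx1 : (x ∈ ([t] : List String) ∨ x ∈ rest) ↔ x ∈ t :: rest := by simp
        rw [hx1, ← hsrt, PySem.List.mem_sorted]
        simp [htitles]
      · exact hndB
    rw [hkey, string_step]
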